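-- pv_equiv track=rewrite | github.com/ywk927/Algorithm | 프로그래머스/2/468379. 선인장 숨기기/선인장 숨기기.py | solution
-- ===== SOURCE A (Python) =====
-- from collections import deque
--
-- def solution(m, n, h, w, drops):
--     answer = [0, 0]
--     INF = len(drops) + 1
--
--     # 1. 비 내린 순서 기록 (안 내린 칸은 INF)
--     arr = [[INF] * n for _ in range(m)]
--     i = 1
--     for r, c in drops:
--         arr[r][c] = i
--         i += 1
--
--     # 2. 각 행에서 너비 w 구간의 최소값 구하기
--     # row_min[i][j] = arr[i][j:j+w]의 최소값
--     row_min = [[0] * (n - w + 1) for _ in range(m)]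
--
--     for i in range(m):
--         dq = deque()
--         for j in range(n):
--             while dq and arr[i][dq[-1]] >= arr[i][j]:
--                 dq.pop()
--             dq.append(j)
--
--             # 윈도우 범위 벗어난 인덱스 제거
--             if dq[0] <= j - w:
--                 dq.popleft()
--
--             # 길이 w 윈도우가 만들어졌으면 최소값 기록
--             if j >= w - 1:
--                 row_min[i][j - w + 1] = arr[i][dq[0]]
--
--     # 3. 각 열에서 높이 h 구간의 최소값 구하기
--     # 즉 h x w 직사각형 전체의 최소값
--     answer_candidate = -1
--
--     for j in range(n - w + 1):
--         dq = deque()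
--         for i in range(m):
--             while dq and row_min[dq[-1]][j] >= row_min[i][j]:
--                 dq.pop()
--             dq.append(i)
--
--             # 윈도우 범위 벗어난 인덱스 제거
--             if dq[0] <= i - h:
--                 dq.popleft()
--
--             # 높이 h 윈도우가 만들어졌으면 직사각형 최소값 확인
--             if i >= h - 1:
--                 rain_number = row_min[dq[0]][j]
--                 top_row = i - h + 1
--
--                 if rain_number > answer_candidate:
--                     answer_candidate = rain_number
--                     answer[0] = top_row
--                     answer[1] = j
--
--     return answer
-- ===== SOURCE B (Python) =====
-- def solution(m, n, h, w, drops):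
--     # Brute force: for every candidate top-left corner (column-outer, row-inner),
--     # compute the minimum rain time over its h x w rectangle directly from a dict
--     # of drop times; undropped cells count as INF. Keep the first strict maximum.
--     INF = len(drops) + 1
--     when = {}
--     for t, (r, c) in enumerate(drops, 1):
--         when[(r, c)] = t
--     best = -1
--     answer = [0, 0]
--     for j in range(n - w + 1):
--         for top in range(m - h + 1):
--             lo = INF
--             for r in range(top, top + h):
--                 for c in range(j, j + w):
--                     v = when.get((r, c), INF)
--                     if v < lo:
--                         lo = v
--             if lo > best:
--                 best = lo
--                 answer = [top, j]
--     return answer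
-- ===== Notes on version B (the rewrite author's own statement) =====
-- stated objective: simpler
-- what changed: Replaces the two monotone-deque sliding-window-minimum passes over a materialized grid with a direct brute-force scan (for every top-left corner, column-outer/row-inner, the rectangle minimum is computed cell by cell from a dict of drop times); …
-- outside the precondition, e.g. on solution(2, 1, 1, 1, [[-1, 0], [0, 0]]): A returns [0, 0], B returns [1, 0]; on solution(1, 1, 1, 0, []): A raises IndexError, B returns [0, 0]; on solution(2, 2, 1, 1, [[0]]): A raises ValueError, B raises ValueError
import Mathlib
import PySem

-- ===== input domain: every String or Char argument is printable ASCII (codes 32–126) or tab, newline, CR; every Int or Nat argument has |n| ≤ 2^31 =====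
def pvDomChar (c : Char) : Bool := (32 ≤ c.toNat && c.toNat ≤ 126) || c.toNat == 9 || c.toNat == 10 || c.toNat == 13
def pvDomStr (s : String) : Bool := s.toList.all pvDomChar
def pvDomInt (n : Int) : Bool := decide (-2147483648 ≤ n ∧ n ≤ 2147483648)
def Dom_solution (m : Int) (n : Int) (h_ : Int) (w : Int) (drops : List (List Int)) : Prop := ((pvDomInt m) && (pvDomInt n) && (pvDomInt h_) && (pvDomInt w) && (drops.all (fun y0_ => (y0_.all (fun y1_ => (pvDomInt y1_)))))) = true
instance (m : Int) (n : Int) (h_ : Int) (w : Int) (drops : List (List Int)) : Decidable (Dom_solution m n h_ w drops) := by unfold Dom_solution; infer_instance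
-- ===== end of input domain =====

-- B replaces A's two monotone-deque sliding-window-minimum passes by a direct
-- brute-force rectangle-minimum scan over a dict of drop times (objective:
-- simpler; B is not faster).

-- ===== PORT A =====

-- Python index normalisation for arr[r] (negative index wraps); in range under Pre_.
def pvNormIdx (len : Int) (r : Int) : Int := if 0 ≤ r then r else r + len

-- arr = [[INF]*n for _ in range(m)]; for i,(r,c) in enumerate(drops,1): arr[r][c] = i
def pvBuildArr (m : Int) (n : Int) (drops : List (List Int)) : List (List Int) :=
  (PySem.List.enumerate drops 1).foldl
    (fun arr p =>
      let ri := (pvNormIdx m (p.2.getD 0 0)).toNat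
      let ci := (pvNormIdx n (p.2.getD 1 0)).toNat
      arr.set ri ((arr.getD ri []).set ci p.1))
    (List.replicate m.toNat (List.replicate n.toNat ((drops.length : Int) + 1)))

-- one step of A's monotone deque (the deque is stored REVERSED: head = back, last = front):
-- while dq and g(dq[-1]) >= g(j): dq.pop(); dq.append(j); if dq[0] <= j - W: dq.popleft()
def pvDqStep (g : Nat → Int) (W : Int) (rq : List Nat) (j : Nat) : List Nat :=
  let rq1 := j :: rq.dropWhile (fun t => decide (g j ≤ g t))
  if ((rq1.getLastD 0 : Nat) : Int) ≤ (j : Int) - W then rq1.dropLast else rq1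

-- A's inner loop of pass 1 for one row a: builds row_min[i] (writes into a zero row).
def pvRowPass (w : Int) (n : Int) (a : List Int) : List Int :=
  ((List.range n.toNat).foldl
    (fun st j =>
      let rq1 := pvDqStep (fun t => a.getD t 0) w st.1 j
      (rq1,
       if (j : Int) ≥ w - 1 then
         st.2.set ((j : Int) - w + 1).toNat (a.getD (rq1.getLastD 0) 0)
       else st.2))
    ([], List.replicate (n - w + 1).toNat 0)).2

def solution (m : Int) (n : Int) (h_ : Int) (w : Int) (drops : List (List Int)) : List Int :=
  let arr := pvBuildArr m n drops
  let row_min := arr.map (fun a => pvRowPass w n a)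
  -- pass 2: sel = (answer_candidate, answer[0], answer[1])
  let res :=
    (List.range (n - w + 1).toNat).foldl
      (fun sel j =>
        ((List.range m.toNat).foldl
          (fun st i =>
            let rq1 := pvDqStep (fun t => (row_min.getD t []).getD j 0) h_ st.1 i
            if (i : Int) ≥ h_ - 1 then
              let rain := (row_min.getD (rq1.getLastD 0) []).getD j 0
              if rain > st.2.1 then (rq1, rain, (i : Int) - h_ + 1, (j : Int))
              else (rq1, st.2)
            else (rq1, st.2))
          (([] : List Nat), sel)).2)
      ((-1 : Int), (0 : Int), (0 : Int))
  [res.2.1, res.2.2]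

-- ===== PORT B =====

-- when[(r,c)] = time of the last drop on cell (r,c)
def pvWhenDict (drops : List (List Int)) : PySem.Dict (Int × Int) Int :=
  (PySem.List.enumerate drops 1).foldl
    (fun d p => d.insert (p.2.getD 0 0, p.2.getD 1 0) p.1)
    PySem.Dict.empty

def solution_alt (m : Int) (n : Int) (h_ : Int) (w : Int) (drops : List (List Int)) : List Int :=
  let INF := (drops.length : Int) + 1
  let when := pvWhenDict drops
  let res :=
    (List.range (n - w + 1).toNat).foldl
      (fun sel j =>
        (List.range (m - h_ + 1).toNat).foldl
          (fun sel top =>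
            let lo :=
              (List.range' top h_.toNat).foldl
                (fun lo (r : Nat) =>
                  (List.range' j w.toNat).foldl
                    (fun lo (c : Nat) =>
                      let v := when.getD ((r : Int), (c : Int)) INF
                      if v < lo then v else lo)
                    lo)
                INF
            if lo > sel.1 then (lo, (top : Int), (j : Int)) else sel)
          sel)
      ((-1 : Int), (0 : Int), (0 : Int))
  [res.2.1, res.2.2]

-- ===== PRECONDITION & SPEC =====
-- Pre_ restricts to the task's natural domain: every drop a pair [r,c] with
-- 0 ≤ r < m and 0 ≤ c < n (out-of-range drops make A raise IndexError; negative
-- coordinates are malformed input on which A's value is an accident of Python's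
-- negative-list-index wraparound), and non-positive window sizes are admitted
-- only on the degenerate grids whose loops never reach the window step (on the
-- others A pops its deque empty and raises IndexError).
def Pre_solution (m : Int) (n : Int) (h_ : Int) (w : Int) (drops : List (List Int)) : Prop :=
  (∀ d ∈ drops, d.length = 2 ∧ 0 ≤ d.getD 0 0 ∧ d.getD 0 0 < m ∧ 0 ≤ d.getD 1 0 ∧ d.getD 1 0 < n) ∧
  ¬(w ≤ 0 ∧ 1 ≤ m ∧ 1 ≤ n) ∧ ¬(h_ ≤ 0 ∧ 1 ≤ m ∧ w ≤ n)
instance (m : Int) (n : Int) (h_ : Int) (w : Int) (drops : List (List Int)) : Decidable (Pre_solution m n h_ w drops) := by unfold Pre_solution; infer_instance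

def pvWitness_solution : Int × Int × Int × Int × List (List Int) := (2, 2, 1, 1, [[0, 0], [1, 1]])

def Spec_solution (m : Int) (n : Int) (h_ : Int) (w : Int) (drops : List (List Int)) (out : List Int) : Prop := out = solution_alt m n h_ w drops
instance (m : Int) (n : Int) (h_ : Int) (w : Int) (drops : List (List Int)) (out : List Int) : Decidable (Spec_solution m n h_ w drops out) := by unfold Spec_solution; infer_instance

-- ===== CLAIM (what is proved, stated in full; the proofs are below) =====
def Claim_equal_solution : Prop := ∀ (m : Int) (n : Int) (h_ : Int) (w : Int) (drops : List (List Int)), Dom_solution m n h_ w drops → Pre_solution m n h_ w drops → Spec_solution m n h_ w drops (solution m n h_ w drops)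

-- ===== LEMMAS AND PROOFS =====

-- ---- generic fold-min machinery ----
def pvFold (vs : List Int) (a : Int) : Int := vs.foldl (fun acc v => if v < acc then v else acc) a

def pvIsMin (vs : List Int) (v : Int) : Prop := v ∈ vs ∧ ∀ x ∈ vs, v ≤ x

theorem pvIsMin_unique {vs : List Int} {v v' : Int} (h : pvIsMin vs v) (h' : pvIsMin vs v') : v = v' :=
  le_antisymm (h.2 v' h'.1) (h'.2 v h.1)

theorem pvFold_le (vs : List Int) (a : Int) : pvFold vs a ≤ a := by
  induction vs generalizing a with
  | nil => simp [pvFold]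
  | cons x t ih =>
    simp only [pvFold, List.foldl_cons]
    refine le_trans (ih _) ?_
    split <;> omega

theorem pvFold_le_mem {vs : List Int} {v : Int} (a : Int) (h : v ∈ vs) : pvFold vs a ≤ v := by
  induction vs generalizing a with
  | nil => simp at h
  | cons x t ih =>
    rcases List.mem_cons.mp h with rfl | hm
    · refine le_trans (pvFold_le t _) ?_
      simp only []
      split <;> omega
    · exact ih _ hm

theorem pvFold_mem_or (vs : List Int) (a : Int) : pvFold vs a = a ∨ pvFold vs a ∈ vs := by
  induction vs generalizing a with
  | nil => left; simp [pvFold]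
  | cons x t ih =>
    simp only [pvFold, List.foldl_cons]
    rcases ih (if x < a then x else a) with h | h
    · rw [pvFold] at h; rw [h]; split
      · right; simp
      · left; rfl
    · right; exact List.mem_cons_of_mem _ h

theorem pvFold_isMin {vs : List Int} {a : Int} (hne : vs ≠ []) (hb : ∀ x ∈ vs, x ≤ a) :
    pvIsMin vs (pvFold vs a) := by
  constructor
  · rcases pvFold_mem_or vs a with h | h
    · obtain ⟨x, hx⟩ := List.exists_mem_of_ne_nil vs hne
      have h1 := pvFold_le_mem a hx
      have h2 := hb x hx
      have : pvFold vs a = x := by omega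
      rw [this]; exact hx
    · exact h
  · exact fun x hx => pvFold_le_mem a hx

theorem pvFold_append (l1 l2 : List Int) (a : Int) : pvFold (l1 ++ l2) a = pvFold l2 (pvFold l1 a) := by
  simp [pvFold, List.foldl_append]

theorem pvFold_flat (rows : List Nat) (f : Nat → List Int) (a : Int) :
    rows.foldl (fun lo (r : Nat) => pvFold (f r) lo) a = pvFold (rows.flatMap f) a := by
  induction rows generalizing a with
  | nil => simp [pvFold]
  | cons r t ih => simp only [List.foldl_cons, List.flatMap_cons, pvFold_append]; exact ih _

theorem pvIsMin_flat {rows : List Nat} {f : Nat → List Int} {u : Nat → Int} {v : Int}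
    (hrow : ∀ r ∈ rows, pvIsMin (f r) (u r)) (hv : pvIsMin (rows.map u) v) :
    pvIsMin (rows.flatMap f) v := by
  constructor
  · obtain ⟨x, hx, hxv⟩ := List.mem_map.mp hv.1
    exact List.mem_flatMap.mpr ⟨x, hx, by rw [← hxv]; exact (hrow x hx).1⟩
  · intro x hx
    obtain ⟨r, hr, hxr⟩ := List.mem_flatMap.mp hx
    exact le_trans (hv.2 (u r) (List.mem_map_of_mem hr)) ((hrow r hr).2 x hxr)

-- ---- the monotone deque, characterised as a filter ----
def pvKeep (g : Nat → Int) (j t : Nat) : Bool :=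
  (List.range (j+1)).all (fun s => !(decide (t < s)) || decide (g t < g s))

def pvWin (W : Int) (j t : Nat) : Bool := decide ((j : Int) - W < (t : Int))

def pvK (g : Nat → Int) (W : Int) (j : Nat) : List Nat :=
  (List.range (j+1)).filter (fun t => pvWin W j t && pvKeep g j t)

def pvDqRun (g : Nat → Int) (W : Int) (len : Nat) : List Nat :=
  (List.range len).foldl (pvDqStep g W) []

theorem pvMem_pvK {g : Nat → Int} {W : Int} {j t : Nat} :
    t ∈ pvK g W j ↔ t < j + 1 ∧ (j : Int) - W < (t : Int) ∧ ∀ s, t < s → s < j + 1 → g t < g s := by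
  simp only [pvK, pvWin, pvKeep, List.mem_filter, List.mem_range, List.all_eq_true,
    Bool.and_eq_true, Bool.or_eq_true, Bool.not_eq_eq_eq_not, Bool.not_true, decide_eq_true_eq,
    decide_eq_false_iff_not, not_lt, List.mem_range]
  constructor
  · rintro ⟨h1, h2, h3⟩
    refine ⟨h1, h2, fun s hs hs' => ?_⟩
    rcases h3 s hs' with h | h
    · omega
    · simpa using h
  · rintro ⟨h1, h2, h3⟩
    refine ⟨h1, h2, fun s hs' => ?_⟩
    by_cases hts : t < s
    · right; simpa using h3 s hts hs'
    · left; simpa using hts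

theorem pvK_pairwise (g : Nat → Int) (W : Int) (j : Nat) : (pvK g W j).Pairwise (· < ·) :=
  List.Pairwise.sublist List.filter_sublist List.pairwise_lt_range

theorem pvK_self_mem {g : Nat → Int} {W : Int} (hW : 1 ≤ W) (j : Nat) : j ∈ pvK g W j := by
  rw [pvMem_pvK]; refine ⟨by omega, by omega, fun s hs hs' => by omega⟩

theorem pvK_ne_nil {g : Nat → Int} {W : Int} (hW : 1 ≤ W) (j : Nat) : pvK g W j ≠ [] :=
  List.ne_nil_of_mem (pvK_self_mem hW j)

theorem pvHeadD_le_of_pairwise {l : List Nat} (hp : l.Pairwise (· < ·)) {x : Nat} (hx : x ∈ l) :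
    l.headD 0 ≤ x := by
  cases l with
  | nil => simp at hx
  | cons a t =>
    rcases List.mem_cons.mp hx with rfl | hm
    · simp
    · exact le_of_lt ((List.pairwise_cons.mp hp).1 x hm)

theorem pvDropWhile_eq_filter {α : Type} (p : α → Bool) (l : List α)
    (h : l.Pairwise (fun x y => p y = true → p x = true)) :
    l.dropWhile p = l.filter (fun x => !p x) := by
  induction l with
  | nil => rfl
  | cons a t ih =>
    rcases List.pairwise_cons.mp h with ⟨ha, ht⟩
    by_cases hp : p a = true
    · rw [List.dropWhile_cons_of_pos hp, List.filter_cons_of_neg (by simp [hp]), ih ht]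
    · rw [List.dropWhile_cons_of_neg (by simp [hp]), List.filter_cons_of_pos (by simp [hp]),
        List.filter_eq_self.mpr]
      intro x hx
      simp only [Bool.not_eq_true'] at hp ⊢
      by_contra hc
      simp only [Bool.not_eq_false] at hc
      exact absurd (ha x hx hc) (by simp [hp])

theorem pvGetLastD_reverse {α : Type} (l : List α) (d : α) : l.reverse.getLastD d = l.headD d := by
  cases l with
  | nil => rfl
  | cons a t => simp

theorem pvDropLast_reverse {α : Type} (l : List α) : l.reverse.dropLast = l.tail.reverse := by
  cases l with
  | nil => rfl
  | cons a t => simp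

theorem pvK_g_pairwise (g : Nat → Int) (W : Int) (j : Nat) :
    (pvK g W j).Pairwise (fun a b => g a < g b) := by
  refine List.Pairwise.imp_of_mem ?_ (pvK_pairwise g W j)
  intro a b ha hb hab
  exact (pvMem_pvK.mp ha).2.2 b hab (pvMem_pvK.mp hb).1

theorem pvKeep_succ {g : Nat → Int} {j t : Nat} (ht : t < j + 1) :
    pvKeep g (j+1) t = (pvKeep g j t && decide (g t < g (j+1))) := by
  have : List.range (j+1+1) = List.range (j+1) ++ [j+1] := List.range_succ
  simp [pvKeep, this, ht]

theorem pvKeep_self (g : Nat → Int) (j : Nat) : pvKeep g j j = true := by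
  simp only [pvKeep, List.all_eq_true]
  intro s hs
  have := List.mem_range.mp hs
  simp [Nat.not_lt.mpr (by omega : s ≤ j)]

theorem pvDq_char (g : Nat → Int) (W : Int) (hW : 1 ≤ W) :
    ∀ j : Nat, pvDqRun g W (j+1) = (pvK g W j).reverse := by
  intro j
  induction j with
  | zero =>
    have h0 : pvDqRun g W 1 = pvDqStep g W [] 0 := by simp [pvDqRun, List.range_one]
    have hgl : (([0] : List Nat).getLastD 0) = 0 := rfl
    have hcond : ¬ (((([(0:Nat)] : List Nat).getLastD 0 : Nat) : Int) ≤ (((0:Nat)) : Int) - W) := by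
      rw [hgl]; push_cast; omega
    have hw0 : pvWin W 0 0 = true := by simp only [pvWin, decide_eq_true_eq]; push_cast; omega
    have hK0 : pvK g W 0 = [0] := by
      simp [pvK, List.range_one, hw0, pvKeep_self]
    rw [h0, pvDqStep, hK0]
    simp only [List.dropWhile_nil, if_neg hcond]
    rfl
  | succ j ih =>
    have hrun : pvDqRun g W (j+2) = pvDqStep g W (pvDqRun g W (j+1)) (j+1) := by
      have : List.range (j+2) = List.range (j+1) ++ [j+1] := List.range_succ
      simp [pvDqRun, this]
    rw [hrun, ih]
    set L := pvK g W j with hL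
    set q : Nat → Bool := fun t => decide (g t < g (j+1)) with hq
    set M : List Nat := (List.range (j+2)).filter (fun t => pvWin W j t && pvKeep g (j+1) t) with hMdef
    -- the popped-and-appended deque is M.reverse
    have hdrop : L.reverse.dropWhile (fun t => decide (g (j+1) ≤ g t)) =
        (L.filter q).reverse := by
      have hpair : L.reverse.Pairwise
          (fun x y => (decide (g (j+1) ≤ g y)) = true → (decide (g (j+1) ≤ g x)) = true) := by
        rw [List.pairwise_reverse]
        refine (pvK_g_pairwise g W j).imp ?_
        intro a b hab
        simp only [decide_eq_true_eq]
        omega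
      rw [pvDropWhile_eq_filter _ _ hpair, ← List.filter_reverse]
      apply List.filter_congr
      intro t _
      rw [hq]
      simp only [← decide_not, decide_eq_decide]
      omega
    have hMM : L.filter q ++ [j+1] = M := by
      rw [hMdef, hL, pvK, List.filter_filter]
      rw [show List.range (j+2) = List.range (j+1) ++ [j+1] from List.range_succ,
        List.filter_append]
      congr 1
      · apply List.filter_congr
        intro t ht
        have ht' : t < j + 1 := List.mem_range.mp ht
        rw [pvKeep_succ ht']
        cases hw : pvWin W j t <;> cases hk : pvKeep g j t <;> simp [hq]
      · have h1 : pvWin W j (j+1) = true := by simp [pvWin]; omega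
        simp [h1, pvKeep_self]
    have hM_mem : (j+1) ∈ M := by
      rw [← hMM]; simp
    have hMne : M ≠ [] := List.ne_nil_of_mem hM_mem
    have hMpair : M.Pairwise (· < ·) :=
      List.Pairwise.sublist List.filter_sublist List.pairwise_lt_range
    have hMwin : ∀ t ∈ M, (j : Int) - W < (t : Int) := by
      intro t ht
      have := (List.mem_filter.mp (hMdef ▸ ht)).2
      simp only [Bool.and_eq_true, pvWin, decide_eq_true_eq] at this
      exact this.1
    have hrq1 : (j+1) :: (L.filter q).reverse = M.reverse := by
      rw [← hMM, List.reverse_append]; simp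
    have hKsucc : pvK g W (j+1) = M.filter (fun t => pvWin W (j+1) t) := by
      rw [hMdef, pvK, List.filter_filter]
      apply List.filter_congr
      intro t _
      cases h1 : pvWin W j t <;> cases h2 : pvWin W (j+1) t <;>
        simp_all [pvWin] <;> omega
    have hfrontD : ∀ (d : Nat), (M.reverse).getLastD d = M.headD d := fun d => pvGetLastD_reverse M d
    simp only [pvDqStep, hdrop, hrq1]
    by_cases hc : ((((M.reverse).getLastD 0 : Nat)) : Int) ≤ (((j+1 : Nat)) : Int) - W
    · rw [if_pos hc]
      rw [pvDropLast_reverse]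
      congr 1
      obtain ⟨a, rest, hMar⟩ := List.exists_cons_of_ne_nil hMne
      rw [hfrontD] at hc
      rw [hMar] at hc
      simp only [List.headD_cons] at hc
      have ha_win : (j : Int) - W < (a : Int) := hMwin a (by rw [hMar]; simp)
      rw [hKsucc, hMar]
      have h1 : pvWin W (j+1) a = false := by
        simp only [pvWin, decide_eq_false_iff_not, not_lt]
        push_cast at hc ⊢
        omega
      rw [List.filter_cons_of_neg (by simp [h1])]
      simp only [List.tail_cons]
      symm
      apply List.filter_eq_self.mpr
      intro t ht
      have hat : a < t := by
        have := List.pairwise_cons.mp (hMar ▸ hMpair)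
        exact this.1 t ht
      simp only [pvWin, decide_eq_true_eq]
      push_cast at hc ⊢
      omega
    · rw [if_neg hc]
      congr 1
      rw [hKsucc]
      symm
      apply List.filter_eq_self.mpr
      intro t ht
      rw [hfrontD] at hc
      have hhead : M.headD 0 ≤ t := pvHeadD_le_of_pairwise hMpair ht
      simp only [pvWin, decide_eq_true_eq]
      push_cast at hc ⊢
      omega

theorem pvK_headD_min (g : Nat → Int) (W : Int) (hW : 1 ≤ W) (j : Nat) :
    (pvK g W j).headD 0 ∈ pvK g W j ∧
      ∀ t : Nat, (j : Int) - W < (t : Int) → t < j + 1 → g ((pvK g W j).headD 0) ≤ g t := by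
  set f := (pvK g W j).headD 0 with hf
  have hmem : f ∈ pvK g W j := by
    have := pvK_ne_nil (g := g) hW j
    cases h : pvK g W j with
    | nil => exact absurd h this
    | cons a rest => rw [hf, h]; simp
  refine ⟨hmem, ?_⟩
  have hfK := pvMem_pvK.mp hmem
  have hrec : ∀ k : Nat, ∀ t : Nat, j - t ≤ k → (j : Int) - W < (t : Int) → t < j + 1 → g f ≤ g t := by
    intro k
    induction k with
    | zero =>
      intro t hk hw ht
      have htj : t = j := by omega
      rcases lt_trichotomy f t with h | h | h
      · exact le_of_lt (hfK.2.2 t h ht)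
      · rw [h]
      · exact absurd (pvHeadD_le_of_pairwise (pvK_pairwise g W j) (pvMem_pvK.mpr ⟨by omega, by omega, fun s hs hs' => by omega⟩)) (by omega)
    | succ k ih =>
      intro t hk hw ht
      rcases lt_trichotomy f t with h | h | h
      · exact le_of_lt (hfK.2.2 t h ht)
      · rw [h]
      · -- t < f: t cannot be in pvK (f is its least element), so keep fails at t
        have hnot : t ∉ pvK g W j := fun hc =>
          absurd (pvHeadD_le_of_pairwise (pvK_pairwise g W j) hc) (by omega)
        rw [pvMem_pvK] at hnot
        push Not at hnot
        obtain ⟨s, hts, hsj, hgs⟩ := hnot ht hw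
        have : j - s ≤ k := by omega
        exact le_trans (ih s this (by push_cast at hw ⊢; omega) hsj) (by omega)
  exact fun t hw ht => hrec (j - t) t le_rfl hw ht


-- ---- grid / dict correspondence ----
def pvCell (drops : List (List Int)) (r c : Nat) : Int :=
  (pvWhenDict drops).getD ((r : Int), (c : Int)) ((drops.length : Int) + 1)

theorem pvGetD_set_self {α : Type} (l : List α) (i : Nat) (a d : α) (h : i < l.length) :
    (l.set i a).getD i d = a := by
  rw [List.getD_eq_getElem?_getD, List.getElem?_set_eq_of_lt _ h]; rfl

theorem pvGetD_set_ne {α : Type} (l : List α) (i j : Nat) (a d : α) (h : i ≠ j) :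
    (l.set i a).getD j d = l.getD j d := by
  rw [List.getD_eq_getElem?_getD, List.getElem?_set_ne h, ← List.getD_eq_getElem?_getD]

theorem pvGetD_replicate {α : Type} (k i : Nat) (x d : α) (h : i < k) :
    (List.replicate k x).getD i d = x := by
  rw [List.getD_eq_getElem?_getD, List.getElem?_replicate, if_pos h]; rfl

theorem pvNormIdx_nonneg {len r : Int} (h1 : 0 ≤ r) : pvNormIdx len r = r := by
  unfold pvNormIdx; rw [if_pos h1]

theorem pvBuild_rel (m n : Int) (INF : Int) :
    ∀ (ps : List (Int × List Int)) (arr0 : List (List Int)) (d0 : PySem.Dict (Int × Int) Int),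
      arr0.length = m.toNat →
      (∀ r, r < m.toNat → (arr0.getD r []).length = n.toNat) →
      (∀ p ∈ ps, 0 ≤ p.2.getD 0 0 ∧ p.2.getD 0 0 < m ∧ 0 ≤ p.2.getD 1 0 ∧ p.2.getD 1 0 < n) →
      (∀ r c : Nat, r < m.toNat → c < n.toNat →
        (arr0.getD r []).getD c 0 = d0.getD ((r : Int), (c : Int)) INF) →
      ((ps.foldl (fun arr p =>
          let ri := (pvNormIdx m (p.2.getD 0 0)).toNat
          let ci := (pvNormIdx n (p.2.getD 1 0)).toNat
          arr.set ri ((arr.getD ri []).set ci p.1)) arr0).length = m.toNat) ∧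
      (∀ r, r < m.toNat → ((ps.foldl (fun arr p =>
          let ri := (pvNormIdx m (p.2.getD 0 0)).toNat
          let ci := (pvNormIdx n (p.2.getD 1 0)).toNat
          arr.set ri ((arr.getD ri []).set ci p.1)) arr0).getD r []).length = n.toNat) ∧
      (∀ r c : Nat, r < m.toNat → c < n.toNat →
        ((ps.foldl (fun arr p =>
          let ri := (pvNormIdx m (p.2.getD 0 0)).toNat
          let ci := (pvNormIdx n (p.2.getD 1 0)).toNat
          arr.set ri ((arr.getD ri []).set ci p.1)) arr0).getD r []).getD c 0 =
        (ps.foldl (fun d p =>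
          d.insert (p.2.getD 0 0, p.2.getD 1 0) p.1) d0).getD
          ((r : Int), (c : Int)) INF) := by
  intro ps
  induction ps with
  | nil => intro arr0 d0 h1 h2 _ h4; exact ⟨h1, h2, h4⟩
  | cons p ps ih =>
    intro arr0 d0 h1 h2 hv h4
    simp only [List.foldl_cons]
    have hp := hv p (List.mem_cons_self)
    have hnr : pvNormIdx m (p.2.getD 0 0) = p.2.getD 0 0 := pvNormIdx_nonneg hp.1
    have hnc : pvNormIdx n (p.2.getD 1 0) = p.2.getD 1 0 := pvNormIdx_nonneg hp.2.2.1
    set ri := (pvNormIdx m (p.2.getD 0 0)).toNat with hri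
    set ci := (pvNormIdx n (p.2.getD 1 0)).toNat with hci
    have hri' : (ri : Int) = p.2.getD 0 0 := by rw [hri, hnr]; omega
    have hci' : (ci : Int) = p.2.getD 1 0 := by rw [hci, hnc]; omega
    have hrim : ri < m.toNat := by omega
    have hcin : ci < n.toNat := by omega
    apply ih
    · simpa using h1
    · intro r hr
      by_cases hrr : r = ri
      · rw [hrr, pvGetD_set_self _ _ _ _ (by omega), List.length_set]
        exact h2 ri hrim
      · rw [pvGetD_set_ne _ _ _ _ _ (by omega)]
        exact h2 r hr
    · exact fun q hq => hv q (List.mem_cons_of_mem _ hq)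
    · intro r c hr hc
      have hkey : (((r : Int), (c : Int)) = (p.2.getD 0 0, p.2.getD 1 0))
          ↔ (r = ri ∧ c = ci) := by
        rw [Prod.mk.injEq]
        constructor
        · rintro ⟨ha, hb⟩; omega
        · rintro ⟨ha, hb⟩; constructor <;> omega
      rw [PySem.Dict.getD_insert]
      by_cases hrr : r = ri ∧ c = ci
      · rw [if_pos (hkey.mpr hrr)]
        obtain ⟨rfl, rfl⟩ := hrr
        rw [pvGetD_set_self _ _ _ _ (by omega),
          pvGetD_set_self _ _ _ _ (by rw [h2 ri hrim]; omega)]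
      · rw [if_neg (fun hcon => hrr (hkey.mp hcon))]
        rw [← h4 r c hr hc]
        rcases Decidable.em (r = ri) with hre | hre
        · subst hre
          have hcc : c ≠ ci := fun hcc => hrr ⟨rfl, hcc⟩
          rw [pvGetD_set_self _ _ _ _ (by omega),
            pvGetD_set_ne _ _ _ _ _ (by omega)]
        · rw [pvGetD_set_ne _ _ _ _ _ (by omega)]

theorem pvArr_spec (m n : Int) (drops : List (List Int))
    (hv : ∀ d ∈ drops, 0 ≤ d.getD 0 0 ∧ d.getD 0 0 < m ∧ 0 ≤ d.getD 1 0 ∧ d.getD 1 0 < n) :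
    (pvBuildArr m n drops).length = m.toNat ∧
    (∀ r, r < m.toNat → ((pvBuildArr m n drops).getD r []).length = n.toNat) ∧
    (∀ r c : Nat, r < m.toNat → c < n.toNat →
      ((pvBuildArr m n drops).getD r []).getD c 0 = pvCell drops r c) := by
  have hmem : ∀ p ∈ PySem.List.enumerate drops 1, p.2 ∈ drops := by
    intro p hp
    rw [PySem.List.mem_enumerate_iff] at hp
    obtain ⟨k, hk, rfl⟩ := hp
    exact List.getElem_mem hk
  have := pvBuild_rel m n ((drops.length : Int) + 1) (PySem.List.enumerate drops 1)
    (List.replicate m.toNat (List.replicate n.toNat ((drops.length : Int) + 1)))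
    PySem.Dict.empty
    (by simp)
    (by intro r hr
        rw [pvGetD_replicate _ _ _ _ hr, List.length_replicate])
    (fun p hp => hv p.2 (hmem p hp))
    (by intro r c hr hc
        rw [pvGetD_replicate _ _ _ _ hr, pvGetD_replicate _ _ _ _ hc,
          PySem.Dict.getD_empty])
  exact ⟨this.1, this.2.1, this.2.2⟩

theorem pvCell_le (drops : List (List Int)) (r c : Nat) :
    pvCell drops r c ≤ (drops.length : Int) + 1 := by
  unfold pvCell pvWhenDict
  have main : ∀ (ps : List (Int × List Int)) (d0 : PySem.Dict (Int × Int) Int),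
      (∀ p ∈ ps, p.1 ≤ (drops.length : Int) + 1) →
      (∀ key : Int × Int, d0.getD key ((drops.length : Int) + 1) ≤ (drops.length : Int) + 1) →
      ∀ key : Int × Int,
        (ps.foldl (fun d p =>
          d.insert (p.2.getD 0 0, p.2.getD 1 0) p.1) d0).getD key
          ((drops.length : Int) + 1) ≤ (drops.length : Int) + 1 := by
    intro ps
    induction ps with
    | nil => intro d0 _ h2 key; exact h2 key
    | cons p ps ih =>
      intro d0 h1 h2 key
      simp only [List.foldl_cons]
      apply ih
      · exact fun q hq => h1 q (List.mem_cons_of_mem _ hq)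
      · intro k
        rw [PySem.Dict.getD_insert]
        split
        · exact h1 p List.mem_cons_self
        · exact h2 k
  apply main
  · intro p hp
    rw [PySem.List.mem_enumerate_iff] at hp
    obtain ⟨k, hk, rfl⟩ := hp
    simp only
    omega
  · intro key
    simp [PySem.Dict.getD_empty]


-- ---- fold restructuring ----
theorem pvFoldl_split {s : Type} (f : (List Nat × s) → Nat → (List Nat × s))
    (d : List Nat → Nat → List Nat) (u : Nat → List Nat → s → s)
    (hf : ∀ st i, f st i = (d st.1 i, u i (d st.1 i) st.2)) :
    ∀ (M : Nat) (rq0 : List Nat) (s0 : s),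
      (List.range M).foldl f (rq0, s0) =
      ((List.range M).foldl d rq0,
       (List.range M).foldl (fun acc i => u i ((List.range (i+1)).foldl d rq0) acc) s0) := by
  intro M
  induction M with
  | zero => intro rq0 s0; simp
  | succ M ih =>
    intro rq0 s0
    rw [show List.range (M+1) = List.range M ++ [M] from List.range_succ]
    simp only [List.foldl_append, List.foldl_cons, List.foldl_nil]
    rw [ih, hf]
    simp only
    congr 1
    rw [show List.range (M+1) = List.range M ++ [M] from List.range_succ]
    simp only [List.foldl_append, List.foldl_cons, List.foldl_nil]

theorem pvFoldl_shift {s : Type} (K : Nat) (u : Nat → s → s) :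
    ∀ (M : Nat) (s0 : s),
      (List.range M).foldl (fun acc i => if K ≤ i then u (i - K) acc else acc) s0 =
      (List.range (M - K)).foldl (fun acc t => u t acc) s0 := by
  intro M
  induction M with
  | zero => intro s0; simp
  | succ M ih =>
    intro s0
    rw [show List.range (M+1) = List.range M ++ [M] from List.range_succ]
    simp only [List.foldl_append, List.foldl_cons, List.foldl_nil]
    rw [ih]
    by_cases hK : K ≤ M
    · rw [if_pos hK, show M + 1 - K = (M - K) + 1 from by omega,
        show List.range ((M-K)+1) = List.range (M-K) ++ [M-K] from List.range_succ]
      simp only [List.foldl_append, List.foldl_cons, List.foldl_nil]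
    · rw [if_neg hK, show M + 1 - K = M - K from by omega]

theorem pvDqRun_succ (g : Nat → Int) (W : Int) (cnt : Nat) :
    pvDqRun g W (cnt+1) = pvDqStep g W (pvDqRun g W cnt) cnt := by
  rw [pvDqRun, pvDqRun, show List.range (cnt+1) = List.range cnt ++ [cnt] from List.range_succ]
  simp [List.foldl_append]

-- ---- pass-1 characterisation: row_min[i][k] is the deque front's value ----
theorem pvRowPass_spec (w : Int) (hw : 1 ≤ w) (n : Int) (a : List Int) :
    ∀ k : Nat, k < (n - w + 1).toNat →
      (pvRowPass w n a).getD k 0 =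
        a.getD ((pvK (fun t => a.getD t 0) w (k + w.toNat - 1)).headD 0) 0 := by
  set g : Nat → Int := fun t => a.getD t 0 with hg
  have main : ∀ cnt : Nat,
      ((List.range cnt).foldl
        (fun st j =>
          let rq1 := pvDqStep (fun t => a.getD t 0) w st.1 j
          (rq1,
           if (j : Int) ≥ w - 1 then
             st.2.set ((j : Int) - w + 1).toNat (a.getD (rq1.getLastD 0) 0)
           else st.2))
        ([], List.replicate (n - w + 1).toNat 0)).1 = pvDqRun g w cnt ∧
      ((List.range cnt).foldl
        (fun st j =>
          let rq1 := pvDqStep (fun t => a.getD t 0) w st.1 j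
          (rq1,
           if (j : Int) ≥ w - 1 then
             st.2.set ((j : Int) - w + 1).toNat (a.getD (rq1.getLastD 0) 0)
           else st.2))
        ([], List.replicate (n - w + 1).toNat 0)).2.length = (n - w + 1).toNat ∧
      ∀ k : Nat, k < (n - w + 1).toNat →
        ((List.range cnt).foldl
          (fun st j =>
            let rq1 := pvDqStep (fun t => a.getD t 0) w st.1 j
            (rq1,
             if (j : Int) ≥ w - 1 then
               st.2.set ((j : Int) - w + 1).toNat (a.getD (rq1.getLastD 0) 0)
             else st.2))
          ([], List.replicate (n - w + 1).toNat 0)).2.getD k 0 =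
          if k + w.toNat ≤ cnt then g ((pvK g w (k + w.toNat - 1)).headD 0) else 0 := by
    intro cnt
    induction cnt with
    | zero =>
      simp only [List.range_zero, List.foldl_nil]
      refine ⟨rfl, by simp, ?_⟩
      intro k hk
      rw [if_neg (by omega), pvGetD_replicate _ _ _ _ hk]
    | succ cnt ih =>
      obtain ⟨ih1, ih2, ih3⟩ := ih
      rw [show List.range (cnt+1) = List.range cnt ++ [cnt] from List.range_succ]
      simp only [List.foldl_append, List.foldl_cons, List.foldl_nil]
      refine ⟨?_, ?_, ?_⟩
      · simp only [ih1]
        exact (pvDqRun_succ g w cnt).symm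
      · dsimp only
        split
        · rw [List.length_set]; exact ih2
        · exact ih2
      · intro k hk
        simp only [ih1]
        have hrq1 : pvDqStep (fun t => a.getD t 0) w (pvDqRun g w cnt) cnt = (pvK g w cnt).reverse := by
          rw [← pvDq_char g w hw cnt, pvDqRun_succ]
        by_cases hge : (cnt : Int) ≥ w - 1
        · rw [if_pos hge]
          have hwn : w.toNat ≥ 1 := by omega
          have hcnt1 : cnt + 1 ≥ w.toNat := by omega
          have hk0 : ((cnt : Int) - w + 1).toNat = cnt + 1 - w.toNat := by omega
          by_cases hkk : k = cnt + 1 - w.toNat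
          · rw [hk0, ← hkk, pvGetD_set_self _ _ _ _ (by rw [ih2]; exact hk)]
            rw [if_pos (by omega)]
            rw [hrq1, pvGetLastD_reverse]
            have : k + w.toNat - 1 = cnt := by omega
            rw [this, hg]
          · rw [hk0, pvGetD_set_ne _ _ _ _ _ (by omega), ih3 k hk]
            have : (k + w.toNat ≤ cnt + 1) ↔ (k + w.toNat ≤ cnt) := by omega
            rw [if_congr this rfl rfl]
        · rw [if_neg hge, ih3 k hk]
          have h1 : ¬ (k + w.toNat ≤ cnt + 1) := by omega
          have h2 : ¬ (k + w.toNat ≤ cnt) := by omega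
          rw [if_neg h1, if_neg h2]
  intro k hk
  have hfin := (main n.toNat).2.2 k hk
  have hcond : k + w.toNat ≤ n.toNat := by omega
  rw [pvRowPass]
  rw [hfin, if_pos hcond]


theorem pvGetD_map (l : List (List Int)) (f : List Int → List Int) (t : Nat) (ht : t < l.length) :
    (l.map f).getD t [] = f (l.getD t []) := by
  rw [List.getD_eq_getElem?_getD, List.getElem?_map, List.getElem?_eq_getElem ht,
    List.getD_eq_getElem?_getD, List.getElem?_eq_getElem ht]
  rfl

-- pass 2 re-indexed: the deque disappears, the guard i ≥ h-1 becomes a fold over top rows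
theorem pvPass2_eq (h_ : Int) (hh : 1 ≤ h_) (G : Nat → Nat → Int) (NW M : Nat) :
    (List.range NW).foldl (fun sel j =>
      ((List.range M).foldl
        (fun st i =>
          let rq1 := pvDqStep (fun t => G j t) h_ st.1 i
          if (i : Int) ≥ h_ - 1 then
            let rain := G j (rq1.getLastD 0)
            if rain > st.2.1 then (rq1, rain, (i : Int) - h_ + 1, (j : Int))
            else (rq1, st.2)
          else (rq1, st.2))
        (([] : List Nat), sel)).2) ((-1 : Int), (0 : Int), (0 : Int)) =
    (List.range NW).foldl (fun sel j =>
      (List.range (M - (h_.toNat - 1))).foldl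
        (fun acc top =>
          if G j ((pvK (fun t => G j t) h_ (top + h_.toNat - 1)).headD 0) > acc.1 then
            (G j ((pvK (fun t => G j t) h_ (top + h_.toNat - 1)).headD 0), (top : Int), (j : Int))
          else acc) sel) ((-1 : Int), (0 : Int), (0 : Int)) := by
  apply List.foldl_ext
  intro sel j _
  have hsplit := pvFoldl_split
    (fun st i =>
      let rq1 := pvDqStep (fun t => G j t) h_ st.1 i
      if (i : Int) ≥ h_ - 1 then
        let rain := G j (rq1.getLastD 0)
        if rain > st.2.1 then (rq1, rain, (i : Int) - h_ + 1, (j : Int))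
        else (rq1, st.2)
      else (rq1, st.2))
    (fun rq i => pvDqStep (fun t => G j t) h_ rq i)
    (fun i rq1 acc =>
      if (i : Int) ≥ h_ - 1 then
        (if G j (rq1.getLastD 0) > acc.1 then (G j (rq1.getLastD 0), (i : Int) - h_ + 1, (j : Int))
         else acc)
      else acc)
    (by intro st i; dsimp only; split_ifs <;> rfl)
    M [] sel
  rw [hsplit]
  dsimp only
  have hstep : ∀ (acc : Int × Int × Int), ∀ i ∈ List.range M,
      (if (i : Int) ≥ h_ - 1 then
        (if G j (((List.range (i+1)).foldl (fun rq i => pvDqStep (fun t => G j t) h_ rq i) []).getLastD 0) > acc.1 then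
          (G j (((List.range (i+1)).foldl (fun rq i => pvDqStep (fun t => G j t) h_ rq i) []).getLastD 0),
            (i : Int) - h_ + 1, (j : Int))
         else acc)
       else acc) =
      (if (h_.toNat - 1) ≤ i then
        (if G j ((pvK (fun t => G j t) h_ ((i - (h_.toNat - 1)) + h_.toNat - 1)).headD 0) > acc.1 then
          (G j ((pvK (fun t => G j t) h_ ((i - (h_.toNat - 1)) + h_.toNat - 1)).headD 0),
            (((i - (h_.toNat - 1)) : Nat) : Int), (j : Int))
         else acc)
       else acc) := by
    intro acc i _
    have hrun : ((List.range (i+1)).foldl (fun rq i => pvDqStep (fun t => G j t) h_ rq i) [])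
        = (pvK (fun t => G j t) h_ i).reverse := pvDq_char (fun t => G j t) h_ hh i
    rw [hrun, pvGetLastD_reverse]
    by_cases hi : (h_.toNat - 1) ≤ i
    · rw [if_pos (by omega), if_pos hi]
      have hidx : (i - (h_.toNat - 1)) + h_.toNat - 1 = i := by omega
      have hcast : (((i - (h_.toNat - 1)) : Nat) : Int) = (i : Int) - h_ + 1 := by omega
      rw [hidx, hcast]
    · rw [if_neg (by omega), if_neg hi]
  rw [List.foldl_ext _ _ sel hstep]
  exact pvFoldl_shift (h_.toNat - 1)
    (fun top acc =>
      if G j ((pvK (fun t => G j t) h_ (top + h_.toNat - 1)).headD 0) > acc.1 then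
        (G j ((pvK (fun t => G j t) h_ (top + h_.toNat - 1)).headD 0), (top : Int), (j : Int))
      else acc) M sel

theorem pv_main (m : Int) (n : Int) (h_ : Int) (w : Int) (drops : List (List Int))
    (hh : 1 ≤ h_) (hw : 1 ≤ w)
    (hv : ∀ d ∈ drops, d.length = 2 ∧ 0 ≤ d.getD 0 0 ∧ d.getD 0 0 < m ∧ 0 ≤ d.getD 1 0 ∧ d.getD 1 0 < n) :
    solution m n h_ w drops = solution_alt m n h_ w drops := by
  have hvd : ∀ d ∈ drops, 0 ≤ d.getD 0 0 ∧ d.getD 0 0 < m ∧ 0 ≤ d.getD 1 0 ∧ d.getD 1 0 < n :=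
    fun d hd => (hv d hd).2
  obtain ⟨hlen, hrows, hcells⟩ := pvArr_spec m n drops hvd
  set arr := pvBuildArr m n drops with harr
  set rmins := arr.map (fun a => pvRowPass w n a) with hrmins
  set G : Nat → Nat → Int := fun j t => (rmins.getD t []).getD j 0 with hG
  set cf : Nat → Nat → Int := fun r c => pvCell drops r c with hcf
  -- row_min windows are row minima of the cells
  have hrowmin : ∀ j, j < (n - w + 1).toNat → ∀ t, t < m.toNat →
      pvIsMin ((List.range' j w.toNat).map (fun c => cf t c)) (G j t) := by
    intro j hj t ht
    have hmap : rmins.getD t [] = pvRowPass w n (arr.getD t []) := by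
      rw [hrmins]; exact pvGetD_map arr _ t (by omega)
    have hGjt : G j t =
        (arr.getD t []).getD ((pvK (fun c => (arr.getD t []).getD c 0) w (j + w.toNat - 1)).headD 0) 0 := by
      rw [hG]
      dsimp only
      rw [hmap, pvRowPass_spec w hw n _ j hj]
    have hKmin := pvK_headD_min (fun c => (arr.getD t []).getD c 0) w hw (j + w.toNat - 1)
    have hfK := pvMem_pvK.mp hKmin.1
    set f := (pvK (fun c => (arr.getD t []).getD c 0) w (j + w.toNat - 1)).headD 0 with hfdef
    have hfj : j ≤ f ∧ f < j + w.toNat := by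
      have h1 := hfK.1
      have h2 := hfK.2.1
      constructor <;> omega
    have hfn : f < n.toNat := by omega
    constructor
    · refine List.mem_map.mpr ⟨f, List.mem_range'_1.mpr ⟨hfj.1, hfj.2⟩, ?_⟩
      rw [hcf]
      dsimp only
      rw [← hcells t f ht hfn, ← hGjt]
    · intro x hx
      obtain ⟨c, hc, rfl⟩ := List.mem_map.mp hx
      have hcb := List.mem_range'_1.mp hc
      have hcn : c < n.toNat := by omega
      have hmin := hKmin.2 c (by omega) (by omega)
      rw [hGjt, hcf]
      dsimp only
      rw [← hcells t c ht hcn]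
      exact hmin
  -- the rectangle minimum computed by B equals A's pass-2 deque front value
  have hlo : ∀ j, j < (n - w + 1).toNat → ∀ top, top + h_.toNat ≤ m.toNat →
      ((List.range' top h_.toNat).foldl
        (fun lo (r : Nat) => (List.range' j w.toNat).foldl
          (fun lo (c : Nat) =>
            let v := (pvWhenDict drops).getD ((r : Int), (c : Int)) ((drops.length : Int) + 1)
            if v < lo then v else lo) lo) ((drops.length : Int) + 1))
      = G j ((pvK (fun t => G j t) h_ (top + h_.toNat - 1)).headD 0) := by
    intro j hj top htop
    have hinner : ∀ (r : Nat) (lo : Int),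
        (List.range' j w.toNat).foldl
          (fun lo (c : Nat) =>
            let v := (pvWhenDict drops).getD ((r : Int), (c : Int)) ((drops.length : Int) + 1)
            if v < lo then v else lo) lo
        = pvFold ((List.range' j w.toNat).map (fun c => cf r c)) lo := by
      intro r lo
      rw [pvFold, List.foldl_map]
      rfl
    have hflat : ((List.range' top h_.toNat).foldl
        (fun lo (r : Nat) => (List.range' j w.toNat).foldl
          (fun lo (c : Nat) =>
            let v := (pvWhenDict drops).getD ((r : Int), (c : Int)) ((drops.length : Int) + 1)
            if v < lo then v else lo) lo) ((drops.length : Int) + 1))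
        = pvFold ((List.range' top h_.toNat).flatMap
            (fun r => (List.range' j w.toNat).map (fun c => cf r c))) ((drops.length : Int) + 1) := by
      rw [← pvFold_flat]
      exact List.foldl_ext _ _ _ (fun lo r _ => hinner r lo)
    have hne : (List.range' top h_.toNat).flatMap
        (fun r => (List.range' j w.toNat).map (fun c => cf r c)) ≠ [] := by
      apply List.ne_nil_of_mem (a := cf top j)
      exact List.mem_flatMap.mpr ⟨top, List.mem_range'_1.mpr ⟨le_refl top, by omega⟩,
        List.mem_map.mpr ⟨j, List.mem_range'_1.mpr ⟨le_refl j, by omega⟩, rfl⟩⟩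
    have hb : ∀ x ∈ (List.range' top h_.toNat).flatMap
        (fun r => (List.range' j w.toNat).map (fun c => cf r c)), x ≤ (drops.length : Int) + 1 := by
      intro x hx
      obtain ⟨r, _, hx2⟩ := List.mem_flatMap.mp hx
      obtain ⟨c, _, rfl⟩ := List.mem_map.mp hx2
      exact pvCell_le drops r c
    have hKmin2 := pvK_headD_min (fun t => G j t) h_ hh (top + h_.toNat - 1)
    have hf2K := pvMem_pvK.mp hKmin2.1
    have hf2b : top ≤ (pvK (fun t => G j t) h_ (top + h_.toNat - 1)).headD 0 ∧
        (pvK (fun t => G j t) h_ (top + h_.toNat - 1)).headD 0 < top + h_.toNat := by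
      have h1 := hf2K.1
      have h2 := hf2K.2.1
      constructor <;> omega
    have hrows2 : pvIsMin ((List.range' top h_.toNat).map (fun t => G j t))
        (G j ((pvK (fun t => G j t) h_ (top + h_.toNat - 1)).headD 0)) := by
      constructor
      · exact List.mem_map.mpr ⟨_, List.mem_range'_1.mpr ⟨hf2b.1, hf2b.2⟩, rfl⟩
      · intro x hx
        obtain ⟨t, htm, rfl⟩ := List.mem_map.mp hx
        have htb := List.mem_range'_1.mp htm
        exact hKmin2.2 t (by omega) (by omega)
    have hrect := pvIsMin_flat
      (fun r hr => hrowmin j hj r (by have := List.mem_range'_1.mp hr; omega)) hrows2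
    rw [hflat]
    exact pvIsMin_unique (pvFold_isMin hne hb) hrect
  -- reshape A with the pass-2 lemma
  have hpass2 := pvPass2_eq h_ hh G ((n - w + 1).toNat) m.toNat
  have hA : solution m n h_ w drops =
      [((List.range ((n - w + 1).toNat)).foldl (fun sel j =>
          (List.range (m.toNat - (h_.toNat - 1))).foldl
            (fun acc top =>
              if G j ((pvK (fun t => G j t) h_ (top + h_.toNat - 1)).headD 0) > acc.1 then
                (G j ((pvK (fun t => G j t) h_ (top + h_.toNat - 1)).headD 0), (top : Int), (j : Int))
              else acc) sel) ((-1 : Int), (0 : Int), (0 : Int))).2.1,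
       ((List.range ((n - w + 1).toNat)).foldl (fun sel j =>
          (List.range (m.toNat - (h_.toNat - 1))).foldl
            (fun acc top =>
              if G j ((pvK (fun t => G j t) h_ (top + h_.toNat - 1)).headD 0) > acc.1 then
                (G j ((pvK (fun t => G j t) h_ (top + h_.toNat - 1)).headD 0), (top : Int), (j : Int))
              else acc) sel) ((-1 : Int), (0 : Int), (0 : Int))).2.2] := by
    rw [← hpass2]
    rfl
  -- reshape B to the same normal form
  have hB : solution_alt m n h_ w drops =
      [((List.range ((n - w + 1).toNat)).foldl
          (fun sel j =>
            (List.range ((m - h_ + 1).toNat)).foldl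
              (fun sel top =>
                let lo := (List.range' top h_.toNat).foldl
                  (fun lo (r : Nat) => (List.range' j w.toNat).foldl
                    (fun lo (c : Nat) =>
                      let v := (pvWhenDict drops).getD ((r : Int), (c : Int)) ((drops.length : Int) + 1)
                      if v < lo then v else lo) lo) ((drops.length : Int) + 1)
                if lo > sel.1 then (lo, (top : Int), (j : Int)) else sel) sel)
          ((-1 : Int), (0 : Int), (0 : Int))).2.1,
       ((List.range ((n - w + 1).toNat)).foldl
          (fun sel j =>
            (List.range ((m - h_ + 1).toNat)).foldl
              (fun sel top =>
                let lo := (List.range' top h_.toNat).foldl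
                  (fun lo (r : Nat) => (List.range' j w.toNat).foldl
                    (fun lo (c : Nat) =>
                      let v := (pvWhenDict drops).getD ((r : Int), (c : Int)) ((drops.length : Int) + 1)
                      if v < lo then v else lo) lo) ((drops.length : Int) + 1)
                if lo > sel.1 then (lo, (top : Int), (j : Int)) else sel) sel)
          ((-1 : Int), (0 : Int), (0 : Int))).2.2] := rfl
  have hBF : (List.range ((n - w + 1).toNat)).foldl
          (fun sel j =>
            (List.range ((m - h_ + 1).toNat)).foldl
              (fun sel top =>
                let lo := (List.range' top h_.toNat).foldl
                  (fun lo (r : Nat) => (List.range' j w.toNat).foldl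
                    (fun lo (c : Nat) =>
                      let v := (pvWhenDict drops).getD ((r : Int), (c : Int)) ((drops.length : Int) + 1)
                      if v < lo then v else lo) lo) ((drops.length : Int) + 1)
                if lo > sel.1 then (lo, (top : Int), (j : Int)) else sel) sel)
          ((-1 : Int), (0 : Int), (0 : Int)) =
      (List.range ((n - w + 1).toNat)).foldl (fun sel j =>
          (List.range (m.toNat - (h_.toNat - 1))).foldl
            (fun acc top =>
              if G j ((pvK (fun t => G j t) h_ (top + h_.toNat - 1)).headD 0) > acc.1 then
                (G j ((pvK (fun t => G j t) h_ (top + h_.toNat - 1)).headD 0), (top : Int), (j : Int))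
              else acc) sel) ((-1 : Int), (0 : Int), (0 : Int)) := by
    apply List.foldl_ext
    intro sel j hj
    have hj' : j < (n - w + 1).toNat := List.mem_range.mp hj
    rw [show (m - h_ + 1).toNat = m.toNat - (h_.toNat - 1) from by omega]
    apply List.foldl_ext
    intro acc top htop
    have htop' : top + h_.toNat ≤ m.toNat := by
      have := List.mem_range.mp htop; omega
    dsimp only
    rw [hlo j hj' top htop']
  rw [hA, hB, hBF]

-- ---- degenerate windows: both programs return [0, 0] ----
theorem pvFoldlFix {α β : Type} (l : List β) (x : α) : l.foldl (fun a (_ : β) => a) x = x := by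
  induction l with
  | nil => rfl
  | cons b t ih => simpa using ih

theorem pvInnerStay (v a b : Int) (j : Nat) (l : List Nat) :
    l.foldl (fun acc (top : Nat) => if v > acc.1 then (v, (top : Int), (j : Int)) else acc)
      (v, a, b) = (v, a, b) := by
  induction l with
  | nil => rfl
  | cons t l ih => simpa [lt_irrefl] using ih

theorem pvInnerFold (v : Int) (hv : -1 < v) (j : Nat) (M : Nat) :
    (List.range M).foldl (fun acc (top : Nat) => if v > acc.1 then (v, (top : Int), (j : Int)) else acc)
      ((-1 : Int), (0 : Int), (0 : Int)) =
      if M = 0 then ((-1 : Int), (0 : Int), (0 : Int)) else (v, (0 : Int), (j : Int)) := by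
  cases M with
  | zero => simp
  | succ k =>
    rw [if_neg k.succ_ne_zero, List.range_succ_eq_map]
    simp only [List.foldl_cons, if_pos hv, Nat.cast_zero]
    exact pvInnerStay v 0 (j : Int) j _

theorem pvOuterStay (v a b : Int) (M : Nat) (l : List Nat) :
    l.foldl (fun sel (j : Nat) =>
        (List.range M).foldl
          (fun acc (top : Nat) => if v > acc.1 then (v, (top : Int), (j : Int)) else acc) sel)
      (v, a, b) = (v, a, b) := by
  induction l with
  | nil => rfl
  | cons j l ih => simpa [pvInnerStay] using ih

theorem pvConstFold (v : Int) (hv : -1 < v) (NW M : Nat) :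
    (((List.range NW).foldl (fun sel (j : Nat) =>
        (List.range M).foldl
          (fun acc (top : Nat) => if v > acc.1 then (v, (top : Int), (j : Int)) else acc) sel)
      ((-1 : Int), (0 : Int), (0 : Int))).2) = ((0 : Int), (0 : Int)) := by
  cases NW with
  | zero => simp
  | succ k =>
    rw [List.range_succ_eq_map]
    simp only [List.foldl_cons]
    rw [pvInnerFold v hv 0 M]
    by_cases hM : M = 0
    · rw [if_pos hM]
      subst hM
      simp only [List.range_zero, List.foldl_nil]
      rw [pvFoldlFix]
    · rw [if_neg hM, pvOuterStay]
      simp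

theorem pvB_degenerate (m : Int) (n : Int) (h_ : Int) (w : Int) (drops : List (List Int))
    (hd : h_.toNat = 0 ∨ w.toNat = 0) : solution_alt m n h_ w drops = [0, 0] := by
  have hINF : (-1 : Int) < (drops.length : Int) + 1 := by
    have : (0 : Int) ≤ (drops.length : Int) := Int.natCast_nonneg _
    omega
  have hlo : ∀ (j top : Nat),
      ((List.range' top h_.toNat).foldl
        (fun lo (r : Nat) => (List.range' j w.toNat).foldl
          (fun lo (c : Nat) =>
            let v := (pvWhenDict drops).getD ((r : Int), (c : Int)) ((drops.length : Int) + 1)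
            if v < lo then v else lo) lo) ((drops.length : Int) + 1))
      = (drops.length : Int) + 1 := by
    intro j top
    rcases hd with hd | hd
    · rw [hd]; rfl
    · rw [hd]
      simp only [List.range'_zero, List.foldl_nil]
      rw [pvFoldlFix]
  have hfun : (fun (sel : Int × Int × Int) (j : Nat) =>
        (List.range (m - h_ + 1).toNat).foldl
          (fun sel (top : Nat) =>
            let lo :=
              (List.range' top h_.toNat).foldl
                (fun lo (r : Nat) =>
                  (List.range' j w.toNat).foldl
                    (fun lo (c : Nat) =>
                      let v := (pvWhenDict drops).getD ((r : Int), (c : Int)) ((drops.length : Int) + 1)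
                      if v < lo then v else lo)
                    lo)
                ((drops.length : Int) + 1)
            if lo > sel.1 then (lo, (top : Int), (j : Int)) else sel) sel) =
      (fun (sel : Int × Int × Int) (j : Nat) =>
        (List.range (m - h_ + 1).toNat).foldl
          (fun acc (top : Nat) =>
            if (drops.length : Int) + 1 > acc.1 then ((drops.length : Int) + 1, (top : Int), (j : Int))
            else acc) sel) := by
    funext sel j
    congr 1
    funext acc top
    dsimp only
    rw [hlo j top]
  show [_, _] = _
  rw [hfun]
  rw [pvConstFold ((drops.length : Int) + 1) hINF]

theorem pvA_m0 (m : Int) (n : Int) (h_ : Int) (w : Int) (drops : List (List Int))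
    (hm : m.toNat = 0) : solution m n h_ w drops = [0, 0] := by
  show [_, _] = _
  rw [hm]
  simp only [List.range_zero, List.foldl_nil]
  rw [pvFoldlFix]

theorem pvA_nw0 (m : Int) (n : Int) (h_ : Int) (w : Int) (drops : List (List Int))
    (hnw : (n - w + 1).toNat = 0) : solution m n h_ w drops = [0, 0] := by
  show [_, _] = _
  rw [hnw]
  simp

theorem pvGetD_replicate0 (k j : Nat) : (List.replicate k (0 : Int)).getD j 0 = 0 := by
  rw [List.getD_eq_getElem?_getD, List.getElem?_replicate]
  split <;> rfl

theorem pvA_n0 (m : Int) (n : Int) (h_ : Int) (w : Int)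
    (hh : 1 ≤ h_) (hn : n.toNat = 0) : solution m n h_ w [] = [0, 0] := by
  set G : Nat → Nat → Int :=
    fun j t => (((pvBuildArr m n []).map (fun a => pvRowPass w n a)).getD t []).getD j 0 with hG
  have harr : pvBuildArr m n [] = List.replicate m.toNat (List.replicate n.toNat 1) := by
    rfl
  have hG0 : ∀ j t : Nat, G j t = 0 := by
    intro j t
    rw [hG]
    dsimp only
    by_cases ht : t < m.toNat
    · rw [pvGetD_map _ _ t (by rw [harr, List.length_replicate]; exact ht), harr,
        pvGetD_replicate _ _ _ _ ht, pvRowPass, hn]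
      simp only [List.range_zero, List.foldl_nil]
      exact pvGetD_replicate0 _ _
    · have hnil : ((pvBuildArr m n []).map (fun a => pvRowPass w n a)).getD t [] = [] := by
        rw [List.getD_eq_getElem?_getD, List.getElem?_eq_none]
        · rfl
        · rw [List.length_map, harr, List.length_replicate]; omega
      rw [hnil]; rfl
  have hpass2 := pvPass2_eq h_ hh G ((n - w + 1).toNat) m.toNat
  have hA : solution m n h_ w [] =
      [((List.range ((n - w + 1).toNat)).foldl (fun sel j =>
          (List.range (m.toNat - (h_.toNat - 1))).foldl
            (fun acc top =>
              if G j ((pvK (fun t => G j t) h_ (top + h_.toNat - 1)).headD 0) > acc.1 then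
                (G j ((pvK (fun t => G j t) h_ (top + h_.toNat - 1)).headD 0), (top : Int), (j : Int))
              else acc) sel) ((-1 : Int), (0 : Int), (0 : Int))).2.1,
       ((List.range ((n - w + 1).toNat)).foldl (fun sel j =>
          (List.range (m.toNat - (h_.toNat - 1))).foldl
            (fun acc top =>
              if G j ((pvK (fun t => G j t) h_ (top + h_.toNat - 1)).headD 0) > acc.1 then
                (G j ((pvK (fun t => G j t) h_ (top + h_.toNat - 1)).headD 0), (top : Int), (j : Int))
              else acc) sel) ((-1 : Int), (0 : Int), (0 : Int))).2.2] := by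
    rw [← hpass2]
    rfl
  rw [hA]
  have hfun : (fun (sel : Int × Int × Int) (j : Nat) =>
        (List.range (m.toNat - (h_.toNat - 1))).foldl
          (fun acc (top : Nat) =>
            if G j ((pvK (fun t => G j t) h_ (top + h_.toNat - 1)).headD 0) > acc.1 then
              (G j ((pvK (fun t => G j t) h_ (top + h_.toNat - 1)).headD 0), (top : Int), (j : Int))
            else acc) sel) =
      (fun (sel : Int × Int × Int) (j : Nat) =>
        (List.range (m.toNat - (h_.toNat - 1))).foldl
          (fun acc (top : Nat) =>
            if (0 : Int) > acc.1 then ((0 : Int), (top : Int), (j : Int)) else acc) sel) := by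
    funext sel j
    congr 1
    funext acc top
    simp only [hG0]
  rw [hfun, pvConstFold 0 (by omega)]

-- ===== VERDICT (by name: the statement is the Claim_ definition above) =====
theorem solution_spec : Claim_equal_solution := by
  intro m n h_ w drops _ hpre
  obtain ⟨hv, pre2, pre3⟩ := hpre
  show solution m n h_ w drops = solution_alt m n h_ w drops
  by_cases hmain : 1 ≤ h_ ∧ 1 ≤ w
  · exact pv_main m n h_ w drops hmain.1 hmain.2 hv
  · have hd : h_.toNat = 0 ∨ w.toNat = 0 := by omega
    rw [pvB_degenerate m n h_ w drops hd]
    by_cases hm : m ≤ 0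
    · exact pvA_m0 m n h_ w drops (by omega)
    · by_cases hw' : w ≤ 0
      · have hn : n ≤ 0 := by omega
        by_cases hh' : 1 ≤ h_
        · have hdrops : drops = [] := by
            cases drops with
            | nil => rfl
            | cons d l =>
              have := (hv d List.mem_cons_self).2.2.2
              omega
          rw [hdrops]
          exact pvA_n0 m n h_ w hh' (by omega)
        · exact pvA_nw0 m n h_ w drops (by omega)
      · exact pvA_nw0 m n h_ w drops (by omega)
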